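-- pv_equiv track=rewrite | github.com/WGabrielCode/Algorithms_DataStructures | Introduction_to_ComputerScience/Others/sesja.py | zgodne
-- ===== SOURCE A (Python) =====
-- def roz(x):
--     l = []
--     if x == 0:
--         return l
--     i = 2
--     while x > 1:
--         while x % i == 0:
--             l.append(i)
--             x = x // i
--         i += 1
--     return l
--
-- def sas(a, b):
--     if roz(a) == roz(b):
--         return True
--     return False
--
-- def zgodne(T):
--     count = 0
--     n = len(T)
--     for i in range(n):
--         has_sas = False
--         for j in range(max(0, i-2), min(n, i+3)):
--             if i != j and sas(T[i], T[j]):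
--                 has_sas = True
--                 break
--         if not has_sas:
--             count += 1
--     return count
-- ===== SOURCE B (Python) =====
-- def roz(x):
--     l = []
--     if x == 0:
--         return l
--     i = 2
--     while x > 1:
--         while x % i == 0:
--             l.append(i)
--             x = x // i
--         i += 1
--     return l
--
-- def zgodne(T):
--     n = len(T)
--     keys = [roz(x) for x in T]
--     has_match = [False] * n
--     for i in range(n):
--         if i + 1 < n and keys[i] == keys[i + 1]:
--             has_match[i] = True
--             has_match[i + 1] = True
--         if i + 2 < n and keys[i] == keys[i + 2]:
--             has_match[i] = True
--             has_match[i + 2] = True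
--     return sum(1 for m in has_match if not m)
-- ===== Notes on version B (the rewrite author's own statement) =====
-- stated objective: faster
-- what changed: Instead of scanning a 5-wide window around every element and re-factorizing both endpoints on each comparison, B factorizes every element exactly once into a key list, then makes a single forward pass comparing only i with i+1 and i+2, marking both endpoints of a matching pair in a boolean table, and finally counts unmarked positions.
import Mathlib
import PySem

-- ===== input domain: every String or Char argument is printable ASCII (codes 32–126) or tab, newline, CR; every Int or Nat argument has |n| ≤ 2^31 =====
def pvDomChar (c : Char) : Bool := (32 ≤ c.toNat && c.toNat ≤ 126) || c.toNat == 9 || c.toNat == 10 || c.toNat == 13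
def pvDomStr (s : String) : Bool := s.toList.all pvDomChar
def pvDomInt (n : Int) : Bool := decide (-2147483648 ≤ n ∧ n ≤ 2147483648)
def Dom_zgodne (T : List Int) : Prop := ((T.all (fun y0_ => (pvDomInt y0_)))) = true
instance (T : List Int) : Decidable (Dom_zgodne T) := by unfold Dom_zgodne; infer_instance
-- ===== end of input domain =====

-- B computes each factorization key once and does one forward mark-both pass instead of A's per-element window scan with repeated roz calls.


-- ===== PORT A =====
def rozInner : Nat → Int → Int → List Int → List Int × Int
  | 0, x, _, l => (l, x)
  | f + 1, x, i, l =>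
    if PySem.Int.mod x i == 0 then rozInner f (PySem.Int.floordiv x i) i (l ++ [i])
    else (l, x)
def rozLoop : Nat → Int → Int → List Int → List Int
  | 0, _, _, l => l
  | f + 1, x, i, l =>
    if x > 1 then
      let p := rozInner (x.toNat + 1) x i l
      rozLoop f p.2 (i + 1) p.1
    else l
def roz (x : Int) : List Int :=
  if x == 0 then [] else rozLoop (x.toNat + 1) x 2 []
def sas (a b : Int) : Bool :=
  if roz a = roz b then true else false
def zgodne (T : List Int) : Int :=
  let n : Int := T.length
  (PySem.List.pyRange 0 n 1).foldl
    (fun count i =>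
      let has_sas :=
        (PySem.List.pyRange (max 0 (i - 2)) (min n (i + 3)) 1).any
          (fun j => decide (i ≠ j) && sas (PySem.List.pyGetD T i 0) (PySem.List.pyGetD T j 0))
      if !has_sas then count + 1 else count)
    0

-- ===== PORT B =====
def zgodne_alt (T : List Int) : Int :=
  let n : Int := T.length
  let keys := T.map roz
  let final :=
    (PySem.List.pyRange 0 n 1).foldl
      (fun M i =>
        let M1 :=
          if i + 1 < n && PySem.List.pyGetD keys i [] == PySem.List.pyGetD keys (i + 1) [] then
            PySem.List.pySetD (PySem.List.pySetD M i true) (i + 1) true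
          else M
        let M2 :=
          if i + 2 < n && PySem.List.pyGetD keys i [] == PySem.List.pyGetD keys (i + 2) [] then
            PySem.List.pySetD (PySem.List.pySetD M1 i true) (i + 2) true
          else M1
        M2)
      (PySem.List.pyRepeat [false] n)
  final.foldl (fun c m => if !m then c + 1 else c) 0

-- ===== PRECONDITION & SPEC =====
def Spec_zgodne (T : List Int) (out : Int) : Prop := out = zgodne_alt T
instance (T : List Int) (out : Int) : Decidable (Spec_zgodne T out) := by unfold Spec_zgodne; infer_instance

-- ===== CLAIM (what is proved, stated in full; the proofs are below) =====
def Claim_equal_zgodne : Prop := ∀ (T : List Int), Dom_zgodne T → Spec_zgodne T (zgodne T)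

-- ===== LEMMAS AND PROOFS =====
def keyN (T : List Int) (a : Nat) : List Int := roz (T.getD a 0)
def FF (T : List Int) (a b : Nat) : Prop := b < T.length ∧ keyN T a = keyN T b
def ffb (T : List Int) (a b : Nat) : Bool := decide (b < T.length) && decide (keyN T a = keyN T b)
def markB (T : List Int) (m : Nat) : Bool :=
  ffb T m (m + 1) || ffb T m (m + 2) || (decide (1 ≤ m) && ffb T (m - 1) m) || (decide (2 ≤ m) && ffb T (m - 2) m)
def markUpToB (T : List Int) (m k : Nat) : Bool :=
  (List.range m).any (fun i =>
    (ffb T i (i + 1) && (decide (k = i) || decide (k = i + 1))) ||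
    (ffb T i (i + 2) && (decide (k = i) || decide (k = i + 2))))

theorem ffb_eq_true_iff (T : List Int) (a b : Nat) : ffb T a b = true ↔ FF T a b := by
  simp [ffb, FF]

theorem markB_eq_true_iff (T : List Int) (m : Nat) :
    markB T m = true ↔
      FF T m (m + 1) ∨ FF T m (m + 2) ∨ (1 ≤ m ∧ FF T (m - 1) m) ∨ (2 ≤ m ∧ FF T (m - 2) m) := by
  simp [markB, ffb_eq_true_iff, Bool.or_eq_true, Bool.and_eq_true, or_assoc]

theorem markUpToB_eq_true_iff (T : List Int) (m k : Nat) :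
    markUpToB T m k = true ↔
      ∃ i, i < m ∧ ((FF T i (i + 1) ∧ (k = i ∨ k = i + 1)) ∨ (FF T i (i + 2) ∧ (k = i ∨ k = i + 2))) := by
  simp [markUpToB, ffb_eq_true_iff, List.any_eq_true]

theorem markUpToB_full (T : List Int) (k : Nat) (hk : k < T.length) :
    markUpToB T T.length k = markB T k := by
  rw [Bool.eq_iff_iff, markUpToB_eq_true_iff, markB_eq_true_iff]
  constructor
  · rintro ⟨i, hi, ⟨hf, hk1 | hk1⟩ | ⟨hf, hk1 | hk1⟩⟩ <;> subst hk1
    · exact Or.inl hf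
    · refine Or.inr (Or.inr (Or.inl ⟨by omega, hk, ?_⟩))
      have : i + 1 - 1 = i := by omega
      rw [this]; exact hf.2
    · exact Or.inr (Or.inl hf)
    · refine Or.inr (Or.inr (Or.inr ⟨by omega, hk, ?_⟩))
      have : i + 2 - 2 = i := by omega
      rw [this]; exact hf.2
  · rintro (hf | hf | ⟨h1, hf⟩ | ⟨h2, hf⟩)
    · exact ⟨k, hk, Or.inl ⟨hf, Or.inl rfl⟩⟩
    · exact ⟨k, hk, Or.inr ⟨hf, Or.inl rfl⟩⟩
    · refine ⟨k - 1, by omega, Or.inl ⟨?_, Or.inr (by omega)⟩⟩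
      have : k - 1 + 1 = k := by omega
      rw [this]; exact hf
    · refine ⟨k - 2, by omega, Or.inr ⟨?_, Or.inr (by omega)⟩⟩
      have : k - 2 + 2 = k := by omega
      rw [this]; exact hf

theorem markUpToB_succ (T : List Int) (m k : Nat) :
    markUpToB T (m + 1) k =
      (markUpToB T m k ||
        ((ffb T m (m + 1) && (decide (k = m) || decide (k = m + 1))) ||
         (ffb T m (m + 2) && (decide (k = m) || decide (k = m + 2))))) := by
  simp [markUpToB, List.range_succ]

theorem keys_getD (T : List Int) (m : Nat) (hm : m < T.length) :
    (T.map roz).getD m [] = keyN T m := by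
  rw [List.getD_eq_getElem _ _ (by simpa using hm), List.getElem_map, keyN,
    List.getD_eq_getElem _ _ hm]

theorem cond_eq (T : List Int) (m j : Nat) (hm : m < T.length) :
    (((m : Int) + (j : Int) < (T.length : Int)) &&
      (PySem.List.pyGetD (T.map roz) (m : Int) [] == PySem.List.pyGetD (T.map roz) ((m : Int) + (j : Int)) []))
      = ffb T m (m + j) := by
  rw [Bool.eq_iff_iff, ffb_eq_true_iff, Bool.and_eq_true, decide_eq_true_eq, beq_iff_eq]
  unfold FF
  have hc : (m : Int) + (j : Int) = ((m + j : Nat) : Int) := by push_cast; ring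
  rw [hc, PySem.List.pyGetD_natCast, PySem.List.pyGetD_natCast]
  constructor
  · rintro ⟨hlt, heq⟩
    have hlt' : m + j < T.length := by exact_mod_cast hlt
    rw [keys_getD T m hm, keys_getD T (m + j) hlt'] at heq
    exact ⟨hlt', heq⟩
  · rintro ⟨hlt', heq⟩
    refine ⟨by exact_mod_cast hlt', ?_⟩
    rw [keys_getD T m hm, keys_getD T (m + j) hlt']
    exact heq

theorem mark_fold (T : List Int) (m : Nat) (hm : m ≤ T.length) :
    (PySem.List.pyRange 0 (m : Int) 1).foldl
      (fun M i =>
        let M1 :=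
          if i + 1 < (T.length : Int) && PySem.List.pyGetD (T.map roz) i [] == PySem.List.pyGetD (T.map roz) (i + 1) [] then
            PySem.List.pySetD (PySem.List.pySetD M i true) (i + 1) true
          else M
        let M2 :=
          if i + 2 < (T.length : Int) && PySem.List.pyGetD (T.map roz) i [] == PySem.List.pyGetD (T.map roz) (i + 2) [] then
            PySem.List.pySetD (PySem.List.pySetD M1 i true) (i + 2) true
          else M1
        M2)
      (PySem.List.pyRepeat [false] (T.length : Int))
    = (List.range T.length).map (fun k => markUpToB T m k) := by
  induction m with
  | zero =>
    simp only [Nat.cast_zero, PySem.List.pyRange_one_eq_nil (le_refl 0), List.foldl_nil,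
      PySem.List.pyRepeat_singleton, Int.toNat_natCast]
    have : ∀ k, markUpToB T 0 k = false := by intro k; simp [markUpToB]
    simp only [this]
    rw [List.map_const', List.length_range]
  | succ m ih =>
    have hm' : m ≤ T.length := by omega
    have hmlt : m < T.length := by omega
    have hcast : ((m + 1 : Nat) : Int) = (m : Int) + 1 := by push_cast; ring
    rw [hcast, PySem.List.pyRange_one_succ_right (by positivity), List.foldl_append, ih hm',
      List.foldl_cons, List.foldl_nil]
    simp only []
    have h1 : ((m : Int) + 1) = (m : Int) + ((1 : Nat) : Int) := by norm_num
    have h2 : ((m : Int) + 2) = (m : Int) + ((2 : Nat) : Int) := by norm_num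
    rw [h1, h2, cond_eq T m 1 hmlt, cond_eq T m 2 hmlt]
    have hset : ∀ (M : List Bool) (a b : Nat),
        PySem.List.pySetD (PySem.List.pySetD M (a : Int) true) ((a : Int) + ((b : Nat) : Int)) true
        = (M.set a true).set (a + b) true := by
      intro M a b
      rw [PySem.List.pySetD_natCast]
      have : (a : Int) + (b : Int) = ((a + b : Nat) : Int) := by push_cast; ring
      rw [this, PySem.List.pySetD_natCast]
    rw [hset, hset]
    rcases hb1 : ffb T m (m + 1) <;> rcases hb2 : ffb T m (m + 2) <;>
      simp only [Bool.false_eq_true, if_false, if_true] <;>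
      · apply List.ext_getElem (by simp)
        intro k hk1 hk2
        simp only [List.getElem_set, List.getElem_map, List.getElem_range] at *
        rw [markUpToB_succ, hb1, hb2]
        by_cases e0 : k = m <;> by_cases e1 : k = m + 1 <;> by_cases e2 : k = m + 2 <;>
          (try (exfalso; omega)) <;>
          simp_all <;>
          · have d0 : (decide (m = k)) = false := by simp; omega
            have d2 : (decide (m + 2 = k)) = false := by simp; omega
            have d1 : (decide (m + 1 = k)) = false := by simp; omega
            simp [d0, d1, d2]

theorem sas_eq_true_iff (a b : Int) : sas a b = true ↔ roz a = roz b := by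
  unfold sas; split <;> simp_all

theorem winAny_eq' (T : List Int) (k : Nat) (hk : k < T.length) :
    ((PySem.List.pyRange (max 0 ((k : Int) - 2)) (min (T.length : Int) ((k : Int) + 3)) 1).any
      (fun j => decide ((k : Int) ≠ j) && sas (PySem.List.pyGetD T (k : Int) 0) (PySem.List.pyGetD T j 0)))
      = markB T k := by
  rw [Bool.eq_iff_iff, List.any_eq_true, markB_eq_true_iff]
  constructor
  · rintro ⟨j, hj, hpred⟩
    rw [PySem.List.mem_pyRange_one] at hj
    simp only [Bool.and_eq_true, decide_eq_true_eq] at hpred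
    obtain ⟨hne, hsas⟩ := hpred
    rw [sas_eq_true_iff] at hsas
    have h0 : (0:Int) ≤ j := le_trans (le_max_left _ _) hj.1
    have hjlt : j < (T.length:Int) := lt_of_lt_of_le hj.2 (min_le_left _ _)
    rw [PySem.List.pyGetD_of_nonneg T 0 h0, PySem.List.pyGetD_natCast] at hsas
    have hcases : j = (k:Int) - 2 ∨ j = (k:Int) - 1 ∨ j = (k:Int) + 1 ∨ j = (k:Int) + 2 := by
      have := hj.1; have := hj.2; omega
    rcases hcases with h1 | h1 | h1 | h1
    · have hk2 : 2 ≤ k := by omega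
      have : j.toNat = k - 2 := by omega
      right; right; right
      exact ⟨hk2, hk, by rw [this] at hsas; unfold keyN; exact hsas.symm⟩
    · have hk1 : 1 ≤ k := by omega
      have : j.toNat = k - 1 := by omega
      right; right; left
      exact ⟨hk1, hk, by rw [this] at hsas; unfold keyN; exact hsas.symm⟩
    · have hjn : j.toNat = k + 1 := by omega
      have : (k+1) < T.length := by omega
      left
      exact ⟨this, by rw [hjn] at hsas; unfold keyN; exact hsas⟩
    · have hjn : j.toNat = k + 2 := by omega
      have : (k+2) < T.length := by omega
      right; left
      exact ⟨this, by rw [hjn] at hsas; unfold keyN; exact hsas⟩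
  · intro hm
    rcases hm with ⟨hb, he⟩ | ⟨hb, he⟩ | ⟨h1, hb, he⟩ | ⟨h2, hb, he⟩
    · refine ⟨(k:Int) + 1, ?_, ?_⟩
      · rw [PySem.List.mem_pyRange_one]; constructor <;> [omega; (push_cast; omega)]
      · simp only [Bool.and_eq_true, decide_eq_true_eq]
        refine ⟨by omega, ?_⟩
        rw [sas_eq_true_iff, PySem.List.pyGetD_natCast]
        have : ((k:Int)+1) = ((k+1:Nat):Int) := by push_cast; ring
        rw [this, PySem.List.pyGetD_natCast]
        exact he
    · refine ⟨(k:Int) + 2, ?_, ?_⟩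
      · rw [PySem.List.mem_pyRange_one]; constructor <;> [omega; (push_cast; omega)]
      · simp only [Bool.and_eq_true, decide_eq_true_eq]
        refine ⟨by omega, ?_⟩
        rw [sas_eq_true_iff, PySem.List.pyGetD_natCast]
        have : ((k:Int)+2) = ((k+2:Nat):Int) := by push_cast; ring
        rw [this, PySem.List.pyGetD_natCast]
        exact he
    · refine ⟨(k:Int) - 1, ?_, ?_⟩
      · rw [PySem.List.mem_pyRange_one]; constructor <;> [omega; (push_cast; omega)]
      · simp only [Bool.and_eq_true, decide_eq_true_eq]
        refine ⟨by omega, ?_⟩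
        rw [sas_eq_true_iff, PySem.List.pyGetD_natCast]
        have : ((k:Int)-1) = ((k-1:Nat):Int) := by omega
        rw [this, PySem.List.pyGetD_natCast]
        exact he.symm
    · refine ⟨(k:Int) - 2, ?_, ?_⟩
      · rw [PySem.List.mem_pyRange_one]; constructor <;> [omega; (push_cast; omega)]
      · simp only [Bool.and_eq_true, decide_eq_true_eq]
        refine ⟨by omega, ?_⟩
        rw [sas_eq_true_iff, PySem.List.pyGetD_natCast]
        have : ((k:Int)-2) = ((k-2:Nat):Int) := by omega
        rw [this, PySem.List.pyGetD_natCast]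
        exact he.symm

theorem zgodne_eq_count (T : List Int) :
    zgodne T = ((List.range T.length).countP (fun k => !markB T k) : Int) := by
  unfold zgodne
  rw [PySem.List.foldl_if_add_one, PySem.List.pyRange_zero_natCast, List.countP_map, zero_add]
  congr 1
  apply List.countP_congr
  intro k hk
  rw [List.mem_range] at hk
  simp only [Function.comp]
  rw [winAny_eq' T k hk]

theorem zgodne_alt_eq_count (T : List Int) :
    zgodne_alt T = ((List.range T.length).countP (fun k => !markB T k) : Int) := by
  simp only [zgodne_alt]
  rw [mark_fold T T.length (le_refl _), PySem.List.foldl_if_add_one, List.countP_map, zero_add]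
  congr 1
  apply List.countP_congr
  intro k hk
  rw [List.mem_range] at hk
  simp only [Function.comp]
  rw [markUpToB_full T k hk]

-- ===== VERDICT (by name: the statement is the Claim_ definition above) =====
theorem zgodne_spec : Claim_equal_zgodne := by
  intro T _
  unfold Spec_zgodne
  rw [zgodne_eq_count, zgodne_alt_eq_count]
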